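-- pv_equiv track=rewrite | github.com/leonardoabadie/hackerrank-puzzles | algorithms/circular_array_rotation.py | circularArrayRotation
-- ===== SOURCE A (Python) =====
-- def consult(index_to_return, queries, i, n):
--     pos = 0
--     while not pos == -1:
--         try:
--             pos = queries.index(i, pos)
--             index_to_return[pos] = n
--             pos += 1
--         except ValueError:
--             pos = -1
--     return index_to_return
--
-- def circularArrayRotation(arr_to_rotate, rotation, queries) -> list:
--     index_to_return = queries[:]
--     queries_count = 0
--     for index, num in enumerate(arr_to_rotate):
--         final_index = index + rotation
--         if final_index >= len(arr_to_rotate):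
--             final_index %= len(arr_to_rotate)
--
--         if final_index in queries:
--             index_to_return = consult(index_to_return, queries, final_index, num)
--             queries_count += queries.count(final_index)
--
--         if queries_count == len(index_to_return):
--             break
--
--     return index_to_return
-- ===== SOURCE B (Python) =====
-- def circularArrayRotation(arr_to_rotate, rotation, queries) -> list:
--     n = len(arr_to_rotate)
--     mapping = {}
--     for index, num in enumerate(arr_to_rotate):
--         final_index = index + rotation
--         if final_index >= n:
--             final_index %= n
--         mapping[final_index] = num
--     return [mapping.get(q, q) for q in queries]
-- ===== Notes on version B (the rewrite author's own statement) =====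
-- stated objective: faster
-- what changed: Replace the per-element scan of queries (membership test, repeated list.index and count over queries for every array element) by one dict built in a single pass over the array, then a single lookup pass over the queries.
import Mathlib
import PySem

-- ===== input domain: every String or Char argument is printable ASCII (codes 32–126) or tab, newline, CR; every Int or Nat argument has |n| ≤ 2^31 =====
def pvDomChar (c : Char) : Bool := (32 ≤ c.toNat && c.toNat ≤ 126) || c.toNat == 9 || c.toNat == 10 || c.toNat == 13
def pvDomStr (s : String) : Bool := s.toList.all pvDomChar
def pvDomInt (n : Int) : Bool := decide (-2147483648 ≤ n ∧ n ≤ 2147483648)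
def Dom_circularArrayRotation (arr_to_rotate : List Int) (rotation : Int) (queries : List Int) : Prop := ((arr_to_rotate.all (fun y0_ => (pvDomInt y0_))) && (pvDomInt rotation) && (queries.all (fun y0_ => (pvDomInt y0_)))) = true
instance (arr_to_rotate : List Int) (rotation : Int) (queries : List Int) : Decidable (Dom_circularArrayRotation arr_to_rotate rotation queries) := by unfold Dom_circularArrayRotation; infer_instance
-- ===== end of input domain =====

-- B replaces A's per-element scans of the query list (membership test, repeated list.index and
-- count) by one dict built in a single pass over the array, then one lookup pass over the queries
-- (objective: faster).

-- ===== PORT A =====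
-- the while-loop of consult: queries.index(i, pos) scans queries forward from pos;
-- each found position gets index_to_return[pos] = n, then the search resumes after it
def consultGo (index_to_return : List Int) (rest : List Int) (pos : Nat) (i : Int) (n : Int) : List Int :=
  match rest with
  | [] => index_to_return
  | q :: rs =>
    if q = i then consultGo (index_to_return.set pos n) rs (pos + 1) i n
    else consultGo index_to_return rs (pos + 1) i n

def consult (index_to_return : List Int) (queries : List Int) (i : Int) (n : Int) : List Int :=
  consultGo index_to_return queries 0 i n

-- the for-loop of circularArrayRotation (pairs = enumerate(arr_to_rotate)), with the break
def caLoop (alen : Int) (rotation : Int) (queries : List Int) (pairs : List (Int × Int))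
    (index_to_return : List Int) (queries_count : Int) : List Int :=
  match pairs with
  | [] => index_to_return
  | (index, num) :: rest =>
    let f0 : Int := index + rotation
    let f : Int := if f0 ≥ alen then PySem.Int.mod f0 alen else f0
    let itr2 := if f ∈ queries then consult index_to_return queries f num else index_to_return
    let qc2 : Int := if f ∈ queries then queries_count + (PySem.List.count queries f : Int) else queries_count
    if qc2 = (itr2.length : Int) then itr2 else caLoop alen rotation queries rest itr2 qc2

def circularArrayRotation (arr_to_rotate : List Int) (rotation : Int) (queries : List Int) : List Int :=
  caLoop (arr_to_rotate.length : Int) rotation queries (PySem.List.enumerate arr_to_rotate) queries 0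

-- ===== PORT B =====
def circularArrayRotation_alt (arr_to_rotate : List Int) (rotation : Int) (queries : List Int) : List Int :=
  let n : Int := (arr_to_rotate.length : Int)
  let mapping : PySem.Dict Int Int :=
    (PySem.List.enumerate arr_to_rotate).foldl (fun d p =>
      let f0 : Int := p.1 + rotation
      let f : Int := if f0 ≥ n then PySem.Int.mod f0 n else f0
      d.insert f p.2) PySem.Dict.empty
  queries.map (fun q => mapping.getD q q)

-- ===== PRECONDITION & SPEC =====
def Spec_circularArrayRotation (arr_to_rotate : List Int) (rotation : Int) (queries : List Int) (out : List Int) : Prop := out = circularArrayRotation_alt arr_to_rotate rotation queries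
instance (arr_to_rotate : List Int) (rotation : Int) (queries : List Int) (out : List Int) : Decidable (Spec_circularArrayRotation arr_to_rotate rotation queries out) := by unfold Spec_circularArrayRotation; infer_instance

-- ===== CLAIM (what is proved, stated in full; the proofs are below) =====
def Claim_equal_circularArrayRotation : Prop := ∀ (arr_to_rotate : List Int) (rotation : Int) (queries : List Int), Dom_circularArrayRotation arr_to_rotate rotation queries → Spec_circularArrayRotation arr_to_rotate rotation queries (circularArrayRotation arr_to_rotate rotation queries)

-- ===== LEMMAS AND PROOFS =====

-- the rotated index of array position i (the value A calls final_index, B uses as dict key)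
def fIdx (alen rotation i : Int) : Int :=
  if i + rotation ≥ alen then PySem.Int.mod (i + rotation) alen else i + rotation

-- one iteration of A's for-loop body, break removed
def stepA (alen rotation : Int) (queries itr : List Int) (p : Int × Int) : List Int :=
  if fIdx alen rotation p.1 ∈ queries then consult itr queries (fIdx alen rotation p.1) p.2 else itr

-- pointwise reducer: the value query q receives from the pair list
def redA (alen rotation q acc : Int) (p : Int × Int) : Int :=
  if fIdx alen rotation p.1 = q then p.2 else acc

lemma consultGo_eq : ∀ (rest b a : List Int) (v num : Int), b.length = rest.length →
    consultGo (a ++ b) rest a.length v num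
      = a ++ List.zipWith (fun q t => if q = v then num else t) rest b := by
  intro rest
  induction rest with
  | nil => intro b a v num h; simp at h; simp [consultGo, h]
  | cons q rs ih =>
    intro b a v num h
    cases b with
    | nil => simp at h
    | cons t bs =>
      simp only [List.length_cons] at h
      by_cases hq : q = v
      · have : consultGo (a ++ t :: bs) (q :: rs) a.length v num
            = consultGo ((a ++ [num]) ++ bs) rs (a ++ [num]).length v num := by
          simp [consultGo, hq]
        rw [this, ih bs (a ++ [num]) v num (by omega)]
        simp [hq]
      · have : consultGo (a ++ t :: bs) (q :: rs) a.length v num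
            = consultGo ((a ++ [t]) ++ bs) rs (a ++ [t]).length v num := by
          simp [consultGo, hq]
        rw [this, ih bs (a ++ [t]) v num (by omega)]
        simp [hq]

lemma consult_eq (queries itr : List Int) (v num : Int) (h : itr.length = queries.length) :
    consult itr queries v num = List.zipWith (fun q t => if q = v then num else t) queries itr := by
  have := consultGo_eq queries itr [] v num h
  simpa [consult] using this

lemma length_consult (queries itr : List Int) (v num : Int) (h : itr.length = queries.length) :
    (consult itr queries v num).length = itr.length := by
  rw [consult_eq queries itr v num h]; simp [h]

lemma zipWith_snd : ∀ (as bs : List Int), as.length = bs.length →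
    List.zipWith (fun _ b => b) as bs = bs := by
  intro as
  induction as with
  | nil => intro bs h; cases bs with
    | nil => simp
    | cons b bt => simp at h
  | cons a t ih =>
    intro bs h
    cases bs with
    | nil => simp at h
    | cons b bt => simp at h; simp [ih bt h]

lemma zipWith_zipWith (f g : Int → Int → Int) : ∀ (as bs : List Int),
    List.zipWith f as (List.zipWith g as bs) = List.zipWith (fun a b => f a (g a b)) as bs := by
  intro as
  induction as with
  | nil => intro bs; simp
  | cons a t ih => intro bs; cases bs <;> simp [ih]

lemma zipWith_congr_mem (f g : Int → Int → Int) : ∀ (as bs : List Int),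
    (∀ a ∈ as, ∀ b, f a b = g a b) →
    List.zipWith f as bs = List.zipWith g as bs := by
  intro as
  induction as with
  | nil => intro bs _; simp
  | cons a t ih =>
    intro bs h
    cases bs with
    | nil => simp
    | cons b bt =>
      simp only [List.zipWith_cons_cons]
      rw [h a (by simp) b, ih bt (fun x hx => h x (by simp [hx]))]

lemma zipWith_self_map (f : Int → Int → Int) (as : List Int) :
    List.zipWith f as as = as.map (fun a => f a a) := by
  induction as with
  | nil => simp
  | cons a t ih => simp [ih]

lemma countP_cons_key (f : Int) (K : List Int) (hf : f ∉ K) : ∀ (L : List Int),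
    L.countP (fun q => decide (q ∈ f :: K))
      = L.countP (fun q => decide (q ∈ K)) + L.count f := by
  intro L
  induction L with
  | nil => simp
  | cons x t ih =>
    simp only [List.countP_cons, List.count_cons, ih]
    by_cases hx : x = f
    · subst hx
      simp [hf]
      omega
    · simp [hx]
      by_cases hK : x ∈ K <;> simp [hK] <;> omega

lemma countP_mem_all (L K : List Int)
    (h : L.countP (fun q => decide (q ∈ K)) = L.length) :
    ∀ q ∈ L, q ∈ K := by
  have := (List.countP_eq_length (p := fun q => decide (q ∈ K)) (l := L)).1 h
  intro q hq
  simpa using this q hq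

-- if none of the remaining rotated indices occurs in queries, the rest of the loop is the identity
lemma foldl_stepA_id (alen rotation : Int) (queries : List Int) : ∀ (pairs : List (Int × Int)) (itr : List Int),
    (∀ p ∈ pairs, fIdx alen rotation p.1 ∉ queries) →
    pairs.foldl (stepA alen rotation queries) itr = itr := by
  intro pairs
  induction pairs with
  | nil => intro itr _; simp
  | cons p ps ih =>
    intro itr h
    have hp := h p (by simp)
    simp only [List.foldl_cons]
    rw [show stepA alen rotation queries itr p = itr by simp [stepA, hp]]
    exact ih itr (fun x hx => h x (by simp [hx]))

-- break elimination: under the counting invariant, caLoop equals the foldl without the break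
lemma caLoop_eq_foldl (alen rotation : Int) (queries : List Int) :
    ∀ (pairs : List (Int × Int)) (itr : List Int) (qc : Int) (K : List Int),
    itr.length = queries.length →
    qc = ((queries.countP (fun q => decide (q ∈ K)) : Nat) : Int) →
    (∀ p ∈ pairs, fIdx alen rotation p.1 ∉ K) →
    pairs.Pairwise (fun p p' => fIdx alen rotation p.1 ≠ fIdx alen rotation p'.1) →
    caLoop alen rotation queries pairs itr qc = pairs.foldl (stepA alen rotation queries) itr := by
  intro pairs
  induction pairs with
  | nil => intro itr qc K _ _ _ _; simp [caLoop]
  | cons p ps ih =>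
    intro itr qc K hlen hqc hfresh hpw
    obtain ⟨index, num⟩ := p
    have hfK : fIdx alen rotation index ∉ K := hfresh (index, num) (by simp)
    have hfresh' : ∀ x ∈ ps, fIdx alen rotation x.1 ∉ (fIdx alen rotation index :: K) := by
      intro x hx
      have h1 : fIdx alen rotation x.1 ∉ K := hfresh x (by simp [hx])
      have h2 : fIdx alen rotation index ≠ fIdx alen rotation x.1 :=
        (List.pairwise_cons.1 hpw).1 x hx
      simp only [List.mem_cons]
      rintro (h | h)
      · exact h2 h.symm
      · exact h1 h
    have hpw' := (List.pairwise_cons.1 hpw).2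
    set f := fIdx alen rotation index with hfdef
    have hcaLoop : caLoop alen rotation queries ((index, num) :: ps) itr qc
        = (let itr2 := if f ∈ queries then consult itr queries f num else itr
           let qc2 : Int := if f ∈ queries then qc + (PySem.List.count queries f : Int) else qc
           if qc2 = (itr2.length : Int) then itr2
           else caLoop alen rotation queries ps itr2 qc2) := by
      simp only [caLoop, hfdef, fIdx]
    rw [hcaLoop]
    by_cases hf : f ∈ queries
    · simp only [if_pos hf]
      have hlen2 : (consult itr queries f num).length = queries.length := by
        rw [length_consult _ _ _ _ hlen, hlen]
      have hqc2 : qc + (PySem.List.count queries f : Int)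
          = ((queries.countP (fun q => decide (q ∈ f :: K)) : Nat) : Int) := by
        rw [countP_cons_key f K hfK queries, hqc, PySem.List.count_eq]
        push_cast; ring
      have hstep : stepA alen rotation queries itr (index, num) = consult itr queries f num := by
        simp [stepA, ← hfdef, hf]
      by_cases hbr : qc + (PySem.List.count queries f : Int) = (((consult itr queries f num).length : Nat) : Int)
      · -- break fires: every query value is already covered, the rest of the fold is the identity
        simp only [if_pos hbr]
        have hall : ∀ q ∈ queries, q ∈ f :: K := by
          apply countP_mem_all
          have : ((queries.countP (fun q => decide (q ∈ f :: K)) : Nat) : Int) = (queries.length : Int) := by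
            rw [← hqc2, hbr, hlen2]
          omega
        rw [List.foldl_cons, hstep, foldl_stepA_id]
        intro x hx hmem
        exact hfresh' x hx (hall _ hmem)
      · simp only [if_neg hbr]
        rw [List.foldl_cons, hstep]
        exact ih (consult itr queries f num) _ (f :: K) (by rw [hlen2]) hqc2 hfresh' hpw'
    · simp only [if_neg hf]
      have hstep : stepA alen rotation queries itr (index, num) = itr := by
        simp [stepA, ← hfdef, hf]
      by_cases hbr : qc = ((itr.length : Nat) : Int)
      · simp only [if_pos hbr]
        have hall : ∀ q ∈ queries, q ∈ K := by
          apply countP_mem_all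
          have : ((queries.countP (fun q => decide (q ∈ K)) : Nat) : Int) = (queries.length : Int) := by
            rw [← hqc, hbr, hlen]
          omega
        rw [List.foldl_cons, hstep, foldl_stepA_id]
        intro x hx hmem
        have h1 : fIdx alen rotation x.1 ∉ K := hfresh x (by simp [hx])
        exact h1 (hall _ hmem)
      · simp only [if_neg hbr]
        rw [List.foldl_cons, hstep]
        exact ih itr qc K hlen hqc (fun x hx => hfresh x (by simp [hx])) hpw'

-- the fold of whole-list updates equals a per-query pointwise fold
lemma foldl_stepA_eq (alen rotation : Int) (queries : List Int) : ∀ (pairs : List (Int × Int)) (itr : List Int),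
    itr.length = queries.length →
    pairs.foldl (stepA alen rotation queries) itr
      = List.zipWith (fun q t => pairs.foldl (redA alen rotation q) t) queries itr := by
  intro pairs
  induction pairs with
  | nil =>
    intro itr h
    simp only [List.foldl_nil]
    exact (zipWith_snd queries itr h.symm).symm
  | cons p ps ih =>
    intro itr h
    simp only [List.foldl_cons]
    by_cases hf : fIdx alen rotation p.1 ∈ queries
    · have hstep : stepA alen rotation queries itr p
          = List.zipWith (fun q t => if q = fIdx alen rotation p.1 then p.2 else t) queries itr := by
        simp [stepA, hf, consult_eq queries itr _ _ h]
      rw [hstep, ih _ (by simp [h])]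
      rw [zipWith_zipWith]
      apply zipWith_congr_mem
      intro q _ t
      have harg : List.foldl (redA alen rotation q) (if q = fIdx alen rotation p.1 then p.2 else t) ps
          = List.foldl (redA alen rotation q) (redA alen rotation q t p) ps := by
        congr 1
        simp only [redA]
        by_cases hq : fIdx alen rotation p.1 = q
        · simp [hq]
        · rw [if_neg (fun h => hq h.symm), if_neg hq]
      rw [harg]
    · have hstep : stepA alen rotation queries itr p = itr := by simp [stepA, hf]
      rw [hstep, ih _ h]
      apply zipWith_congr_mem
      intro q hq t
      have hne : fIdx alen rotation p.1 ≠ q := fun he => hf (he ▸ hq)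
      rw [show redA alen rotation q t p = t by simp [redA, hne]]

-- the dict lookup after the insert fold is the same pointwise fold
lemma getD_foldl_insert (alen rotation : Int) : ∀ (pairs : List (Int × Int)) (d : PySem.Dict Int Int) (q d0 : Int),
    (pairs.foldl (fun d p => d.insert (fIdx alen rotation p.1) p.2) d).getD q d0
      = pairs.foldl (redA alen rotation q) (d.getD q d0) := by
  intro pairs
  induction pairs with
  | nil => intro d q d0; simp
  | cons p ps ih =>
    intro d q d0
    simp only [List.foldl_cons]
    rw [ih]
    congr 1
    rw [PySem.Dict.getD_insert]
    simp only [redA]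
    by_cases hq : fIdx alen rotation p.1 = q
    · simp [hq]
    · rw [if_neg (fun h => hq h.symm), if_neg hq]

-- distinct array positions get distinct rotated indices
lemma fIdx_ne (alen rotation i i' : Int) (hi : 0 ≤ i) (hlt : i < i') (hi' : i' < alen) :
    fIdx alen rotation i ≠ fIdx alen rotation i' := by
  intro h
  have hn : 0 < alen := by omega
  have hmod : ∀ x : Int, (fIdx alen rotation x) % alen = (x + rotation) % alen := by
    intro x
    unfold fIdx
    split
    · rw [PySem.Int.mod_eq_emod_of_pos hn, Int.emod_emod_of_dvd _ (dvd_refl alen)]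
    · rfl
  have h2 : (i + rotation) % alen = (i' + rotation) % alen := by
    rw [← hmod i, ← hmod i', h]
  have h3 : alen ∣ (i' + rotation) - (i + rotation) := Int.ModEq.dvd h2
  have h4 : alen ∣ i' - i := by
    have e : (i' + rotation) - (i + rotation) = i' - i := by ring
    rwa [e] at h3
  have h5 := Int.le_of_dvd (by omega) h4
  omega

lemma enumerate_pairwise (arr : List Int) (rotation : Int) :
    (PySem.List.enumerate arr).Pairwise
      (fun p p' => fIdx (arr.length : Int) rotation p.1 ≠ fIdx (arr.length : Int) rotation p'.1) := by
  apply List.Pairwise.imp_of_mem (l := PySem.List.enumerate arr)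
    (R := fun p q => p.1 < q.1) ?_ (PySem.List.pairwise_lt_enumerate arr 0)
  intro p p' hp hp' hlt
  obtain ⟨k, hk, rfl⟩ := (PySem.List.mem_enumerate_iff _ _ _).1 hp
  obtain ⟨k', hk', rfl⟩ := (PySem.List.mem_enumerate_iff _ _ _).1 hp'
  exact fIdx_ne _ _ _ _ (by push_cast; omega) (by simpa using hlt) (by push_cast; omega)

-- ===== VERDICT (by name: the statement is the Claim_ definition above) =====
theorem circularArrayRotation_spec : Claim_equal_circularArrayRotation := by
  intro arr rotation queries _
  unfold Spec_circularArrayRotation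
  unfold circularArrayRotation circularArrayRotation_alt
  rw [caLoop_eq_foldl (arr.length : Int) rotation queries (PySem.List.enumerate arr) queries 0 []
        rfl (by simp) (by simp) (enumerate_pairwise arr rotation)]
  rw [foldl_stepA_eq _ _ _ _ _ rfl, zipWith_self_map]
  apply List.map_congr_left
  intro q _
  rw [show (fun (d : PySem.Dict Int Int) (p : Int × Int) =>
        d.insert (if p.1 + rotation ≥ (arr.length : Int) then PySem.Int.mod (p.1 + rotation) (arr.length : Int) else p.1 + rotation) p.2)
      = (fun d p => d.insert (fIdx (arr.length : Int) rotation p.1) p.2) from rfl]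
  rw [getD_foldl_insert]
  simp
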